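-- pv_equiv track=rewrite | github.com/royappa/contests | AdventOfCode2017/p24a.py | f
-- ===== SOURCE A (Python) =====
-- def f(parts, conn, tot, k):
--   if len(parts) == 0:
--     return (k, tot)
--   m = (k, tot)
--   for i, (a, b) in enumerate(parts):
--     if a == conn or b == conn:
--       m = max(m, (k, tot+a+b))
--       rest = parts[:i] + parts[i+1:]
--       str = f(rest, b if a == conn else a, tot+a+b, k+1)
--       m = max(m, str)
--   return m
-- ===== SOURCE B (Python) =====
-- def f(parts, conn, tot, k):
--     # Iterative DFS with an explicit stack instead of recursion; same lexicographic max.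
--     best = (k, tot)
--     stack = [(parts, conn, tot, k)]
--     while stack:
--         ps, c, t, kk = stack.pop()
--         for i, (a, b) in enumerate(ps):
--             if a == c or b == c:
--                 nt = t + a + b
--                 cand = (kk + 1, nt)
--                 if cand > best:
--                     best = cand
--                 stack.append((ps[:i] + ps[i+1:], b if a == c else a, nt, kk + 1))
--     return best
-- ===== Notes on version B (the rewrite author's own statement) =====
-- stated objective: alternative
-- what changed: Replaced A's recursive tree search (recursion on the remaining-parts list with max folded through the call tree) by an iterative depth-first search over an explicit stack of (parts, connector, total, depth) states that updates a single running best value.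
import Mathlib
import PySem

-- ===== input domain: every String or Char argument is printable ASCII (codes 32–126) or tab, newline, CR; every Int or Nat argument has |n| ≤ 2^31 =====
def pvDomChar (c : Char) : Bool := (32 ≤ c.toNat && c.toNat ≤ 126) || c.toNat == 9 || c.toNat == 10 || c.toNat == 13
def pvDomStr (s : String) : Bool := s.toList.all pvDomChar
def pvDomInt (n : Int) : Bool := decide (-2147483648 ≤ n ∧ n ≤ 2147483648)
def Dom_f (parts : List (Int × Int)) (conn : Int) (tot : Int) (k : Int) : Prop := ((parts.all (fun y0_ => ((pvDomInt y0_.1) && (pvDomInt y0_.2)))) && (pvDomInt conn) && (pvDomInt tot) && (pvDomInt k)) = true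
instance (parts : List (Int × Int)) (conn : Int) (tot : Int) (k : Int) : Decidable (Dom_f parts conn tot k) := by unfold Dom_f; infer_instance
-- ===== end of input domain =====

-- B replaces A's recursion by an iterative DFS over an explicit stack of states (alternative
-- decomposition, same exploration of the part tree); return values proved equal.

-- ===== PORT A =====

-- Python's max on int pairs (lexicographic; ties keep the first argument).
def pyMax (x y : Int × Int) : Int × Int :=
  if x.1 < y.1 ∨ (x.1 = y.1 ∧ x.2 < y.2) then y else x

-- length of parts[:i] + parts[i+1:] for an in-range index (used only for termination)
theorem pvRestLen (parts : List (Int × Int)) (i : Int) (j : Nat) (hij : i = (j : Int))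
    (hj : j < parts.length) :
    (PySem.List.slice parts none (some i) ++ PySem.List.slice parts (some (i + 1)) none).length
      = parts.length - 1 := by
  subst hij
  have h1 : PySem.List.slice parts none (some (j : Int)) = parts.take j :=
    PySem.List.slice_to_natCast parts j
  have h2 : PySem.List.slice parts (some ((j : Int) + 1)) none = parts.drop (j + 1) := by
    have := PySem.List.slice_from_natCast parts (j + 1)
    simpa [Nat.cast_add] using this
  rw [h1, h2]
  simp [List.length_append, List.length_take, List.length_drop]
  omega

mutual
-- literal port of A's recursive f
def f (parts : List (Int × Int)) (conn : Int) (tot : Int) (k : Int) : Int × Int :=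
  if parts.length = 0 then (k, tot)
  else fLoop parts conn tot k (PySem.List.enumerate parts 0).attach (k, tot)
  termination_by (parts.length, parts.length + 1)
  decreasing_by
    right
    simp [PySem.List.length_enumerate]

-- A's for-loop over enumerate(parts), threading m
def fLoop (parts : List (Int × Int)) (conn : Int) (tot : Int) (k : Int) :
    List {x // x ∈ PySem.List.enumerate parts 0} → (Int × Int) → Int × Int
  | [], m => m
  | ⟨(i, (a, b)), _hmem⟩ :: rest, m =>
    if a = conn ∨ b = conn then
      let m1 := pyMax m (k, tot + a + b)
      let restParts := PySem.List.slice parts none (some i) ++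
                       PySem.List.slice parts (some (i + 1)) none
      let s := f restParts (if a = conn then b else a) (tot + a + b) (k + 1)
      fLoop parts conn tot k rest (pyMax m1 s)
    else fLoop parts conn tot k rest m
  termination_by l m => (parts.length, l.length)
  decreasing_by
    · obtain ⟨j, hj, hx⟩ := (PySem.List.mem_enumerate_iff _ _ _).1 _hmem
      have hi : i = (j : Int) := by
        have := congrArg Prod.fst hx; simpa using this
      have := pvRestLen parts i j hi hj
      left
      omega
    · right; simp only [List.length_cons]; omega
    · right; simp only [List.length_cons]; omega
end

-- ===== PORT B =====

-- a DFS state: (remaining parts, connector, total, depth)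
def PState := List (Int × Int) × Int × Int × Int

-- B's inner for-loop over one popped state: pushes children, updates best
def binner (ps : List (Int × Int)) (c : Int) (t : Int) (kk : Int) :
    List (Int × (Int × Int)) → List PState → (Int × Int) → List PState × (Int × Int)
  | [], stack, best => (stack, best)
  | (i, (a, b)) :: rest, stack, best =>
    if a = c ∨ b = c then
      let nt := t + a + b
      let cand : Int × Int := (kk + 1, nt)
      let best' := if best.1 < cand.1 ∨ (best.1 = cand.1 ∧ best.2 < cand.2) then cand else best
      binner ps c t kk rest
        ((PySem.List.slice ps none (some i) ++ PySem.List.slice ps (some (i + 1)) none,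
          (if a = c then b else a), nt, kk + 1) :: stack) best'
    else binner ps c t kk rest stack best

-- termination measure for the while-loop: sum of (|parts|+1)! over the stack
def wsum (st : List PState) : Nat := (st.map (fun s => (s.1.length + 1).factorial)).sum

theorem pvBinnerWsum (ps : List (Int × Int)) (c t kk : Int) :
    ∀ (l : List (Int × (Int × Int))) (stack : List PState) (best : Int × Int),
    (∀ x ∈ l, ∃ j : Nat, x.1 = (j : Int) ∧ j < ps.length) →
    wsum ((binner ps c t kk l stack best).1) ≤ wsum stack + l.length * ps.length.factorial := by
  intro l
  induction l with
  | nil => intro stack best _; simp [binner]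
  | cons x rest ih =>
    intro stack best hmem
    obtain ⟨i, a, b⟩ := x
    obtain ⟨j, hij, hj⟩ := hmem (i, (a, b)) (by simp)
    by_cases hc : a = c ∨ b = c
    · simp only [binner, if_pos hc]
      have hlen := pvRestLen ps i j (by simpa using hij) hj
      refine (ih _ _ (fun x hx => hmem x (by simp [hx]))).trans ?_
      have hL : 1 ≤ ps.length := by omega
      have : (ps.length - 1 + 1).factorial = ps.length.factorial := by
        congr 1; omega
      simp [wsum, hlen, this]
      ring_nf
      omega
    · simp only [binner, if_neg hc]
      have := ih stack best (fun x hx => hmem x (by simp [hx]))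
      refine this.trans ?_
      have : rest.length * ps.length.factorial ≤ (rest.length + 1) * ps.length.factorial :=
        Nat.mul_le_mul_right _ (by omega)
      simp only [List.length_cons]
      omega

-- B's while-loop: pop a state, expand it, continue
def bloop : List PState → (Int × Int) → Int × Int
  | [], best => best
  | (ps, c, t, kk) :: stack, best =>
    let p := binner ps c t kk (PySem.List.enumerate ps 0) stack best
    bloop p.1 p.2
termination_by st best => wsum st
decreasing_by
  have hbound := pvBinnerWsum ps c t kk (PySem.List.enumerate ps 0) stack best
    (by
      intro x hx
      obtain ⟨j, hj, hxe⟩ := (PySem.List.mem_enumerate_iff _ _ _).1 hx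
      exact ⟨j, by simp [hxe], hj⟩)
  have hlt : ps.length * ps.length.factorial < (ps.length + 1).factorial := by
    rw [Nat.factorial_succ, Nat.succ_mul]
    have := Nat.factorial_pos ps.length
    omega
  simp only [p, wsum, List.map_cons, List.sum_cons, PySem.List.length_enumerate] at *
  omega

-- literal port of B: seed best with (k, tot), run the stack loop from the initial state
def f_alt (parts : List (Int × Int)) (conn : Int) (tot : Int) (k : Int) : Int × Int :=
  bloop [(parts, conn, tot, k)] (k, tot)

-- ===== PRECONDITION & SPEC =====
def Spec_f (parts : List (Int × Int)) (conn : Int) (tot : Int) (k : Int) (out : Int × Int) : Prop := out = f_alt parts conn tot k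
instance (parts : List (Int × Int)) (conn : Int) (tot : Int) (k : Int) (out : Int × Int) : Decidable (Spec_f parts conn tot k out) := by unfold Spec_f; infer_instance

-- ===== CLAIM (what is proved, stated in full; the proofs are below) =====
def Claim_equal_f : Prop := ∀ (parts : List (Int × Int)) (conn : Int) (tot : Int) (k : Int), Dom_f parts conn tot k → Spec_f parts conn tot k (f parts conn tot k)

-- ===== LEMMAS AND PROOFS =====

def ple (x y : Int × Int) : Prop := x.1 < y.1 ∨ (x.1 = y.1 ∧ x.2 ≤ y.2)

theorem ple_refl (x : Int × Int) : ple x x := by simp [ple]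

theorem ple_trans {x y z : Int × Int} (h1 : ple x y) (h2 : ple y z) : ple x z := by
  obtain ⟨x1, x2⟩ := x; obtain ⟨y1, y2⟩ := y; obtain ⟨z1, z2⟩ := z
  simp [ple] at *; omega

theorem pyMax_le_left (x y : Int × Int) : ple x (pyMax x y) := by
  obtain ⟨x1, x2⟩ := x; obtain ⟨y1, y2⟩ := y
  unfold pyMax; split_ifs with h1 <;> simp [ple] at * <;> omega

theorem pyMax_le_right (x y : Int × Int) : ple y (pyMax x y) := by
  obtain ⟨x1, x2⟩ := x; obtain ⟨y1, y2⟩ := y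
  unfold pyMax; split_ifs with h1 <;> simp [ple] at * <;> omega

theorem pyMax_of_le {x y : Int × Int} (h : ple x y) : pyMax x y = y := by
  obtain ⟨x1, x2⟩ := x; obtain ⟨y1, y2⟩ := y
  simp [ple] at h; unfold pyMax
  split_ifs with h1 <;> simp_all [Prod.mk.injEq] <;> omega

theorem pyMax_comm (x y : Int × Int) : pyMax x y = pyMax y x := by
  obtain ⟨x1, x2⟩ := x; obtain ⟨y1, y2⟩ := y
  unfold pyMax
  split_ifs with h1 h2 <;> simp_all [Prod.mk.injEq] <;> omega

theorem pyMax_assoc (x y z : Int × Int) : pyMax (pyMax x y) z = pyMax x (pyMax y z) := by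
  obtain ⟨x1, x2⟩ := x; obtain ⟨y1, y2⟩ := y; obtain ⟨z1, z2⟩ := z
  unfold pyMax
  split_ifs <;> simp_all [Prod.mk.injEq] <;> omega

theorem pyMax_absorb {x y : Int × Int} (m : Int × Int) (h : ple x y) :
    pyMax (pyMax m x) y = pyMax m y := by
  rw [pyMax_assoc, pyMax_of_le h]

-- folding pyMax: pull an extra pyMax argument out of the accumulator
theorem foldl_pyMax_out {α : Type} (g : α → Int × Int) :
    ∀ (l : List α) (b c : Int × Int),
    List.foldl (fun x y => pyMax x (g y)) (pyMax b c) l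
      = pyMax (List.foldl (fun x y => pyMax x (g y)) b l) c := by
  intro l
  induction l with
  | nil => intro b c; rfl
  | cons x t ih =>
    intro b c
    simp only [List.foldl_cons]
    rw [pyMax_assoc, pyMax_comm c (g x), ← pyMax_assoc, ih]

theorem foldl_pyMax_le {α : Type} (g : α → Int × Int) :
    ∀ (l : List α) (b : Int × Int), ple b (List.foldl (fun x y => pyMax x (g y)) b l) := by
  intro l
  induction l with
  | nil => intro b; exact ple_refl b
  | cons x t ih =>
    intro b
    exact ple_trans (pyMax_le_left b (g x)) (ih (pyMax b (g x)))

theorem foldl_pyMax_mem {α : Type} (g : α → Int × Int) :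
    ∀ (l : List α) (b : Int × Int) (x : α), x ∈ l →
    ple (g x) (List.foldl (fun x y => pyMax x (g y)) b l) := by
  intro l
  induction l with
  | nil => intro b x hx; simp at hx
  | cons y t ih =>
    intro b x hx
    rcases List.mem_cons.1 hx with h | h
    · subst h
      exact ple_trans (pyMax_le_right b (g x)) (foldl_pyMax_le g t _)
    · exact ih _ x h

theorem foldl_pyMax_reverse {α : Type} (g : α → Int × Int) :
    ∀ (l : List α) (b : Int × Int),
    List.foldl (fun x y => pyMax x (g y)) b l.reverse
      = List.foldl (fun x y => pyMax x (g y)) b l := by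
  intro l
  induction l with
  | nil => intro b; rfl
  | cons x t ih =>
    intro b
    simp only [List.reverse_cons, List.foldl_append, List.foldl_cons, List.foldl_nil, ih]
    rw [← foldl_pyMax_out]

-- folding the bases first and then the (larger) values equals folding the values alone
theorem foldl_pyMax_absorbs {α : Type} (gb gv : α → Int × Int) :
    ∀ (l : List α) (b : Int × Int), (∀ c ∈ l, ple (gb c) (gv c)) →
    List.foldl (fun x y => pyMax x (gv y)) (List.foldl (fun x y => pyMax x (gb y)) b l) l
      = List.foldl (fun x y => pyMax x (gv y)) b l := by
  intro l
  induction l with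
  | nil => intro b _; rfl
  | cons c t ih =>
    intro b h
    simp only [List.foldl_cons]
    rw [foldl_pyMax_out gb t b (gb c), pyMax_absorb _ (h c (by simp)),
        foldl_pyMax_out gv t _ (gv c), ih _ (fun c hc => h c (by simp [hc])),
        ← foldl_pyMax_out gv t b (gv c)]

-- A's value at a DFS state
def fval (s : PState) : Int × Int := f s.1 s.2.1 s.2.2.1 s.2.2.2

-- A's result dominates (k, tot)
theorem fLoop_le (parts : List (Int × Int)) (conn tot k : Int) :
    ∀ (l : List {x // x ∈ PySem.List.enumerate parts 0}) (m : Int × Int),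
    ple m (fLoop parts conn tot k l m) := by
  intro l
  induction l with
  | nil => intro m; simp [fLoop]; exact ple_refl m
  | cons x t ih =>
    intro m
    obtain ⟨⟨i, a, b⟩, _hmem⟩ := x
    by_cases hc : a = conn ∨ b = conn
    · simp only [fLoop, if_pos hc]
      exact ple_trans (ple_trans (pyMax_le_left m _) (pyMax_le_left _ _)) (ih _)
    · simp only [fLoop, if_neg hc]
      exact ih m

theorem f_ge_base (parts : List (Int × Int)) (conn tot k : Int) :
    ple (k, tot) (f parts conn tot k) := by
  rw [f]
  split_ifs with h
  · exact ple_refl _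
  · exact fLoop_le parts conn tot k _ (k, tot)

-- the children states a popped state generates (proof-side description of both loops)
def collect (ps : List (Int × Int)) (c t kk : Int) : List (Int × (Int × Int)) → List PState
  | [] => []
  | (i, (a, b)) :: rest =>
    if a = c ∨ b = c then
      (PySem.List.slice ps none (some i) ++ PySem.List.slice ps (some (i + 1)) none,
        (if a = c then b else a), t + a + b, kk + 1) :: collect ps c t kk rest
    else collect ps c t kk rest

-- base value of a state
def bval (s : PState) : Int × Int := (s.2.2.2, s.2.2.1)

-- A's loop = fold of f's values over the children
theorem fLoop_eq_foldl (parts : List (Int × Int)) (conn tot k : Int) :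
    ∀ (l : List {x // x ∈ PySem.List.enumerate parts 0}) (m : Int × Int),
    fLoop parts conn tot k l m
      = List.foldl (fun x y => pyMax x (fval y)) m
          (collect parts conn tot k (l.map Subtype.val)) := by
  intro l
  induction l with
  | nil => intro m; simp [fLoop, collect]
  | cons x t ih =>
    intro m
    obtain ⟨⟨i, a, b⟩, hmem⟩ := x
    by_cases hc : a = conn ∨ b = conn
    · simp only [fLoop, if_pos hc, List.map_cons, collect, List.foldl_cons]
      rw [ih]
      congr 1
      -- pyMax (pyMax m (k, tot+a+b)) (f child) = pyMax m (f child)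
      have hb : ple ((k : Int), tot + a + b)
          (f (PySem.List.slice parts none (some i) ++ PySem.List.slice parts (some (i + 1)) none)
             (if a = conn then b else a) (tot + a + b) (k + 1)) := by
        refine ple_trans ?_ (f_ge_base _ _ _ _)
        simp [ple]
      exact pyMax_absorb m hb
    · simp only [fLoop, if_neg hc, List.map_cons, collect]
      rw [ih]

-- B's inner loop = push the children (reversed) and fold their bases into best
theorem binner_eq (ps : List (Int × Int)) (c t kk : Int) :
    ∀ (l : List (Int × (Int × Int))) (stack : List PState) (best : Int × Int),
    binner ps c t kk l stack best
      = ((collect ps c t kk l).reverse ++ stack,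
         List.foldl (fun x y => pyMax x (bval y)) best (collect ps c t kk l)) := by
  intro l
  induction l with
  | nil => intro stack best; simp [binner, collect]
  | cons x rest ih =>
    intro stack best
    obtain ⟨i, a, b⟩ := x
    by_cases hc : a = c ∨ b = c
    · simp only [binner, if_pos hc, collect]
      rw [ih]
      simp [bval, pyMax, List.foldl_cons]
    · simp only [binner, if_neg hc, collect]
      exact ih stack best

-- each state's base is below A's value there
theorem bval_le_fval (s : PState) : ple (bval s) (fval s) := by
  obtain ⟨ps, c, t, kk⟩ := s
  exact f_ge_base ps c t kk

-- f at a state = fold of f's values over its children, seeded with the base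
theorem f_eq_foldl_collect (ps : List (Int × Int)) (c t kk : Int) :
    f ps c t kk = List.foldl (fun x y => pyMax x (fval y)) (kk, t)
        (collect ps c t kk (PySem.List.enumerate ps 0)) := by
  rw [f]
  split_ifs with h
  · have : ps = [] := List.length_eq_zero_iff.1 h
    subst this
    simp [PySem.List.enumerate, collect]
  · rw [fLoop_eq_foldl]
    congr 1
    simp [List.attach_map_subtype_val]

-- the main invariant: bloop folds A's value over every stacked state
theorem bloop_eq : ∀ (stack : List PState) (best : Int × Int),
    (∀ s ∈ stack, ple (bval s) best) →
    bloop stack best = List.foldl (fun x y => pyMax x (fval y)) best stack := by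
  intro stack best h
  induction stack, best using bloop.induct with
  | case1 best => simp [bloop]
  | case2 ps c t kk stack best p ih =>
    rw [bloop]
    have hbin := binner_eq ps c t kk (PySem.List.enumerate ps 0) stack best
    have hp1 : p.1 = (collect ps c t kk (PySem.List.enumerate ps 0)).reverse ++ stack := by
      rw [show p = binner ps c t kk (PySem.List.enumerate ps 0) stack best from rfl, hbin]
    have hp2 : p.2 = List.foldl (fun x y => pyMax x (bval y)) best
        (collect ps c t kk (PySem.List.enumerate ps 0)) := by
      rw [show p = binner ps c t kk (PySem.List.enumerate ps 0) stack best from rfl, hbin]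
    set ch := collect ps c t kk (PySem.List.enumerate ps 0) with hch
    have hside : ∀ s ∈ p.1, ple (bval s) p.2 := by
      intro s hs
      rw [hp1] at hs
      rw [hp2]
      rcases List.mem_append.1 hs with hmem | hmem
    -- child: its base was folded into best'
      · exact foldl_pyMax_mem bval ch best s (List.mem_reverse.1 hmem)
      · exact ple_trans (h s (by simp [hmem])) (foldl_pyMax_le bval ch best)
    rw [ih hside, hp1, hp2]
    rw [List.foldl_append, foldl_pyMax_reverse,
        foldl_pyMax_absorbs bval fval ch best (fun c _ => bval_le_fval c)]
    have hbase : ple (bval (ps, c, t, kk)) best := h _ (by simp)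
    have : List.foldl (fun x y => pyMax x (fval y)) best ch
        = pyMax best (fval (ps, c, t, kk)) := by
      rw [show fval (ps, c, t, kk) = f ps c t kk from rfl, f_eq_foldl_collect, ← hch]
      rw [show pyMax best (List.foldl (fun x y => pyMax x (fval y)) (kk, t) ch)
            = pyMax (List.foldl (fun x y => pyMax x (fval y)) (kk, t) ch) best from
          pyMax_comm _ _]
      rw [← foldl_pyMax_out fval ch (kk, t) best]
      congr 1
      exact (pyMax_of_le hbase).symm
    rw [this, List.foldl_cons]

theorem f_eq_f_alt (parts : List (Int × Int)) (conn tot k : Int) :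
    f parts conn tot k = f_alt parts conn tot k := by
  rw [f_alt, bloop_eq [(parts, conn, tot, k)] (k, tot)
      (by intro s hs; simp at hs; subst hs; exact ple_refl _)]
  simp only [List.foldl_cons, List.foldl_nil]
  rw [show fval (parts, conn, tot, k) = f parts conn tot k from rfl]
  exact (pyMax_of_le (f_ge_base parts conn tot k)).symm

-- ===== VERDICT (by name: the statement is the Claim_ definition above) =====
theorem f_spec : Claim_equal_f := by
  intro parts conn tot k _
  unfold Spec_f
  exact f_eq_f_alt parts conn tot k
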